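-- pv_equiv track=rewrite | github.com/LasseKohlmeyer/ma-doc-embeddings | common_words.py | relaxed
-- ===== SOURCE A (Python) =====
-- from collections import defaultdict
-- from typing import Dict, List, Set
--
-- def relaxed(series_dictionary: Dict[str, List[str]], doc_texts: Dict[str, List[str]]) -> Dict[str, Set[str]]:
--     common_words = defaultdict(set)
--     for series_id, doc_ids in series_dictionary.items():
--         series_words = []
--         for doc_id in doc_ids:
--             series_words.append(set(doc_texts[doc_id]))
--         common_words[series_id] = set.intersection(*series_words)
--
--     return dict(common_words)
-- ===== SOURCE B (Python) =====
-- def relaxed(series_dictionary, doc_texts):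
--     common_words = {}
--     for series_id, doc_ids in series_dictionary.items():
--         counts = {}
--         for doc_id in doc_ids:
--             for w in set(doc_texts[doc_id]):
--                 counts[w] = counts.get(w, 0) + 1
--         n = len(doc_ids)
--         common_words[series_id] = {w for w, c in counts.items() if c == n}
--     return common_words
-- ===== Notes on version B (the rewrite author's own statement) =====
-- stated objective: alternative
-- what changed: Replaces the explicit set.intersection over a list of per-document word sets by a single per-series word-count table (counting each word once per document) and keeping the words whose count equals the number of documents.
import Mathlib
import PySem

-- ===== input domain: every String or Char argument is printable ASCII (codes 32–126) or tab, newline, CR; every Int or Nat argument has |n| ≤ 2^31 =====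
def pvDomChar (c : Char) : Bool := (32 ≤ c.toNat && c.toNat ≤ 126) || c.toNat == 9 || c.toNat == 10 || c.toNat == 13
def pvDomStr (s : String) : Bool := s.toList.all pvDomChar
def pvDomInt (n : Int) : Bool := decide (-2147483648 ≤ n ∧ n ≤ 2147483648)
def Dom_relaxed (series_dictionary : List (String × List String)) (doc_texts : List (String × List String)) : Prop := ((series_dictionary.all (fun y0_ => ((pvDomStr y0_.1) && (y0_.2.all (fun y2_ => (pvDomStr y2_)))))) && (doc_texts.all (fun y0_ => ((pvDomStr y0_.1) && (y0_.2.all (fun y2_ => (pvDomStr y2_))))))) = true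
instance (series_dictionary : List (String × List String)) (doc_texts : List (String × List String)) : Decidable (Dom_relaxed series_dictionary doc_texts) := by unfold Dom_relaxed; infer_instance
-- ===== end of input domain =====

-- B replaces the explicit set.intersection over per-document word sets by one word-count table per
-- series, keeping the words whose per-document count equals the number of documents (objective: alternative).

-- ===== PORT A =====
-- set.intersection(*series_words): Python raises TypeError when series_words is empty (excluded by Pre_relaxed)
def pvInterAll (sets : List (PySem.Set String)) : PySem.Set String :=
  match sets with
  | [] => []
  | s :: rest => rest.foldl PySem.Set.inter s

def relaxed (series_dictionary : List (String × List String)) (doc_texts : List (String × List String)) : List (String × List String) :=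
  let d := PySem.Dict.mk doc_texts
  -- doc_texts[doc_id]: KeyError on a missing key (excluded by Pre_relaxed), hence the harmless .getD []
  (series_dictionary.foldl
    (fun cw p =>
      cw.insert p.1 (pvInterAll (p.2.map (fun doc_id => PySem.Set.ofList ((d.get? doc_id).getD [])))))
    PySem.Dict.empty).items

-- ===== PORT B =====
-- counts[w] = counts.get(w, 0) + 1 over set(doc_texts[doc_id]) for each doc_id
def pvCounts (d : PySem.Dict String (List String)) (doc_ids : List String) : PySem.Dict String Int :=
  doc_ids.foldl
    (fun counts doc_id =>
      (PySem.Set.ofList ((d.get? doc_id).getD [])).foldl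
        (fun counts w => counts.insert w (counts.getD w 0 + 1)) counts)
    PySem.Dict.empty

def relaxed_alt (series_dictionary : List (String × List String)) (doc_texts : List (String × List String)) : List (String × List String) :=
  let d := PySem.Dict.mk doc_texts
  (series_dictionary.foldl
    (fun cw p =>
      let counts := pvCounts d p.2
      let n : Int := p.2.length
      cw.insert p.1 (PySem.Set.ofList ((counts.items.filter (fun q => q.2 == n)).map Prod.fst)))
    PySem.Dict.empty).items

-- ===== PRECONDITION & SPEC =====
-- Pre_ excludes exactly the inputs on which A raises: a series with an empty doc_ids list
-- (set.intersection() with no arguments is a TypeError) or a doc_id missing from doc_texts (KeyError).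
def Pre_relaxed (series_dictionary : List (String × List String)) (doc_texts : List (String × List String)) : Prop :=
  ∀ p ∈ series_dictionary, p.2 ≠ [] ∧ ∀ i ∈ p.2, i ∈ doc_texts.map Prod.fst
instance (series_dictionary : List (String × List String)) (doc_texts : List (String × List String)) : Decidable (Pre_relaxed series_dictionary doc_texts) := by unfold Pre_relaxed; infer_instance

def pvWitness_relaxed : (List (String × List String)) × (List (String × List String)) :=
  ([("s", ["d1", "d2"])], [("d1", ["a", "b"]), ("d2", ["b", "c"])])

def Spec_relaxed (series_dictionary : List (String × List String)) (doc_texts : List (String × List String)) (out : List (String × List String)) : Prop := out = relaxed_alt series_dictionary doc_texts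
instance (series_dictionary : List (String × List String)) (doc_texts : List (String × List String)) (out : List (String × List String)) : Decidable (Spec_relaxed series_dictionary doc_texts out) := by unfold Spec_relaxed; infer_instance

-- ===== CLAIM (what is proved, stated in full; the proofs are below) =====
def Claim_equal_relaxed : Prop := ∀ (series_dictionary : List (String × List String)) (doc_texts : List (String × List String)), Dom_relaxed series_dictionary doc_texts → Pre_relaxed series_dictionary doc_texts → Spec_relaxed series_dictionary doc_texts (relaxed series_dictionary doc_texts)

-- ===== LEMMAS AND PROOFS =====

-- flattened count of a list of duplicate-free lists is bounded by the number of lists …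
lemma countFlatten_le (w : String) (L : List (List String)) (h : ∀ t ∈ L, t.Nodup) :
    L.flatten.count w ≤ L.length := by
  induction L with
  | nil => simp
  | cons t L ih =>
    have h1 : t.count w ≤ 1 := List.nodup_iff_count_le_one.mp (h t (by simp)) w
    have h2 := ih (fun s hs => h s (by simp [hs]))
    simp only [List.flatten_cons, List.count_append, List.length_cons]
    omega

-- … and attains it exactly when every list contains the word
lemma countFlatten_eq_iff (w : String) (L : List (List String)) (h : ∀ t ∈ L, t.Nodup) :
    L.flatten.count w = L.length ↔ ∀ t ∈ L, w ∈ t := by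
  induction L with
  | nil => simp
  | cons t L ih =>
    have h1 : t.count w ≤ 1 := List.nodup_iff_count_le_one.mp (h t (by simp)) w
    have h2 := countFlatten_le w L (fun s hs => h s (by simp [hs]))
    have h3 := ih (fun s hs => h s (by simp [hs]))
    simp only [List.flatten_cons, List.count_append, List.length_cons, List.mem_cons]
    constructor
    · intro he
      have ht : t.count w = 1 := by omega
      have hL : L.flatten.count w = L.length := by omega
      refine fun s hs => ?_
      rcases hs with rfl | hs
      · exact List.count_pos_iff.mp (by omega)
      · exact (h3.mp hL) s hs
    · intro hall
      have ht : 0 < t.count w := List.count_pos_iff.mpr (hall t (Or.inl rfl))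
      have hL : L.flatten.count w = L.length := h3.mpr (fun s hs => hall s (Or.inr hs))
      omega

-- A's intersection fold is a filter of the first set
lemma foldl_inter (s : PySem.Set String) (rest : List (PySem.Set String)) :
    rest.foldl PySem.Set.inter s = s.filter (fun w => rest.all (fun t => PySem.Set.contains t w)) := by
  induction rest generalizing s with
  | nil => simp
  | cons t rest ih =>
    simp only [List.foldl_cons, ih, List.all_cons]
    show (PySem.Set.inter s t).filter _ = _
    rw [show PySem.Set.inter s t = s.filter (fun w => PySem.Set.contains t w) from rfl,
        List.filter_filter]
    simp [Bool.and_comm]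

-- B's per-series value, rewritten through the counter lemmas
lemma counts_as_flatten (d : PySem.Dict String (List String)) (doc_ids : List String) :
    pvCounts d doc_ids =
      ((doc_ids.map (fun i => PySem.Set.ofList ((d.get? i).getD []))).flatten).foldl
        (fun c w => c.insert w (c.getD w 0 + 1)) PySem.Dict.empty := by
  rw [pvCounts, List.foldl_flatten, List.foldl_map]

-- the per-series equality: intersection of the document word-sets = words counted in every document
lemma perSeries (d : PySem.Dict String (List String)) (doc_ids : List String) (hne : doc_ids ≠ []) :
    pvInterAll (doc_ids.map (fun i => PySem.Set.ofList ((d.get? i).getD []))) =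
      PySem.Set.ofList
        (((pvCounts d doc_ids).items.filter (fun q => q.2 == (doc_ids.length : Int))).map Prod.fst) := by
  match doc_ids, hne with
  | i0 :: ids, _ =>
  set g : String → PySem.Set String := fun i => PySem.Set.ofList ((d.get? i).getD []) with hg
  set s : PySem.Set String := g i0 with hs
  set rest : List (PySem.Set String) := ids.map g with hrest
  have hsnd : s.Nodup := PySem.Set.nodup_ofList _
  have hrnd : ∀ t ∈ rest, t.Nodup := by
    intro t ht
    obtain ⟨i, _, rfl⟩ := List.mem_map.mp ht
    exact PySem.Set.nodup_ofList _
  set F : List String := s ++ rest.flatten with hF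
  have hmapcons : (i0 :: ids).map g = s :: rest := by simp [hs, hrest]
  -- the counter over the series is the counter of the flattened word-sets
  have hc : pvCounts d (i0 :: ids) = F.foldl (fun c w => c.insert w (c.getD w 0 + 1)) PySem.Dict.empty := by
    rw [counts_as_flatten, hmapcons]; simp [hF]
  have hkeys : (pvCounts d (i0 :: ids)).keys = PySem.Set.ofList F := by
    rw [hc, PySem.Dict.keys_foldl_insert]
    simp [PySem.Set.update_nil_left]
  have hnd : (pvCounts d (i0 :: ids)).keys.Nodup := by rw [hkeys]; exact PySem.Set.nodup_ofList _
  have hget : ∀ w, (pvCounts d (i0 :: ids)).getD w 0 = F.count w := by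
    intro w
    rw [hc, PySem.Dict.getD_foldl_insert_add_one]
    simp
  -- B's filtered items are the filtered keys
  have hB : ((pvCounts d (i0 :: ids)).items.filter
        (fun q => q.2 == ((i0 :: ids).length : Int))).map Prod.fst =
      (PySem.Set.ofList F).filter (fun w => (F.count w : Int) == ((i0 :: ids).length : Int)) := by
    rw [PySem.Dict.items_eq_map_keys _ hnd 0, List.filter_map, List.map_map]
    simp only [Function.comp_def, hget]
    rw [hkeys]
    simp
  rw [List.map_cons]
  show List.foldl PySem.Set.inter s rest = _
  rw [foldl_inter, hB]
  -- split set(F) into the first document's words and the genuinely new words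
  have hsplit : PySem.Set.ofList F = s ++ (PySem.Set.ofList rest.flatten).filter (fun y => !(PySem.Set.contains s y)) := by
    rw [hF, PySem.Set.ofList_append, hs, hg, PySem.Set.ofList_ofList, ← hg, ← hs,
        PySem.Set.update_eq_append_filter]
  rw [hsplit, List.filter_append]
  have hnewnil : ((PySem.Set.ofList rest.flatten).filter (fun y => !(PySem.Set.contains s y))).filter
      (fun w => (F.count w : Int) == ((i0 :: ids).length : Int)) = [] := by
    rw [List.filter_eq_nil_iff]
    intro y hy
    have hy' := List.mem_filter.mp hy
    have hns : y ∉ s := by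
      have h2 := (List.mem_filter.mp hy).2
      simpa using h2
    have hcount : F.count y = rest.flatten.count y := by
      simp [hF, List.count_append, List.count_eq_zero_of_not_mem hns]
    have hle : rest.flatten.count y ≤ rest.length := countFlatten_le y rest hrnd
    have hlen : rest.length = ids.length := by rw [hrest, List.length_map]
    simp only [beq_iff_eq, hcount]
    intro hEq
    rw [List.length_cons] at hEq
    omega
  rw [hnewnil, List.append_nil,
      PySem.Set.ofList_eq_self_of_nodup _ (List.Nodup.filter _ hsnd)]
  apply List.filter_congr
  intro w hw
  have h1 : s.count w = 1 := List.count_eq_one_of_mem hsnd hw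
  have hcw : F.count w = 1 + rest.flatten.count w := by
    rw [hF, List.count_append, h1]
  have hlen : rest.length = ids.length := by rw [hrest, List.length_map]
  rw [Bool.eq_iff_iff]
  simp only [List.all_eq_true, beq_iff_eq, hcw, List.length_cons]
  constructor
  · intro hall
    have hcnt : rest.flatten.count w = rest.length :=
      (countFlatten_eq_iff w rest hrnd).mpr (fun t ht => by simpa using hall t ht)
    omega
  · intro hEq
    have hcnt : rest.flatten.count w = rest.length := by omega
    intro t ht
    simpa using (countFlatten_eq_iff w rest hrnd).mp hcnt t ht

-- ===== VERDICT (by name: the statement is the Claim_ definition above) =====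
theorem relaxed_spec : Claim_equal_relaxed := by
  intro sd dt _ hpre
  show relaxed sd dt = relaxed_alt sd dt
  unfold relaxed relaxed_alt
  refine congrArg PySem.Dict.items ?_
  refine PySem.List.foldl_congr_mem _ _ _ _ ?_
  intro acc p hp
  rw [perSeries (PySem.Dict.mk dt) p.2 (hpre p hp).1]
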